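-- pv_equiv track=rewrite | github.com/charlie6118/codility_TDD | 12_CommonPrimeDivisors/src/commonPrimeDivisors.py | hasSameFactor
-- ===== SOURCE A (Python) =====
-- def gcd(a, b):
--     if a % b == 0:
--         return b
--     return gcd(b, a % b)
--
-- def hasSameFactor(a, b):
--     gcdValue = gcd(a, b)
--     while a != 1:
--         gcd_a = gcd(a, gcdValue)
--         if gcd_a == 1:
--             break
--         a = a // gcd_a
--     else:
--         while b != 1:
--             gcd_b = gcd(b, gcdValue)
--             if gcd_b == 1:
--                 break
--             b = b // gcd_b
--         else:
--             return True
--     return False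
-- ===== SOURCE B (Python) =====
-- def hasSameFactor(a, b):
--     # Positive ints below 2**32 have every prime exponent < 32, so a and b
--     # share the same set of prime divisors iff each divides the other's 32nd power.
--     return b**32 % a == 0 and a**32 % b == 0
-- ===== Notes on version B (the rewrite author's own statement) =====
-- stated objective: simpler
-- what changed: Replaces the recursive-gcd stripping loops with a single closed-form divisibility test: on the 32-bit domain a and b share the same set of prime divisors iff a | b**32 and b | a**32; Pre_ keeps the task's natural domain of positive integers, since elsewhere A raises, diverges, or returns sign-accidental values.
-- outside the precondition, e.g. on hasSameFactor(-6, 6): A returns False, B returns True; on hasSameFactor(6, -6): A returns True, B returns True; on hasSameFactor(-6, -12): A returns True, B returns True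
import Mathlib
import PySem

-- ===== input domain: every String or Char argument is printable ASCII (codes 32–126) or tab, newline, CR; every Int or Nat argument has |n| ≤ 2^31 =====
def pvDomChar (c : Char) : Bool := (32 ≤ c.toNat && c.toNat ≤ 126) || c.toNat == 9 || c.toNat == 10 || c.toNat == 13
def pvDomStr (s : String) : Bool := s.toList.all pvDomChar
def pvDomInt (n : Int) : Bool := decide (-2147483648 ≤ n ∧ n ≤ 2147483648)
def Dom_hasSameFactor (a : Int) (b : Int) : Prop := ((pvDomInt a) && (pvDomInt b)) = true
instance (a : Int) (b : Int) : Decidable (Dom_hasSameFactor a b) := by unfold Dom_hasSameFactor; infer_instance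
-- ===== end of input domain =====

-- B replaces A's gcd-stripping loops by the closed-form test a | b**32 ∧ b | a**32 (valid on the 32-bit domain); objective: simpler.

-- ===== PORT A =====
-- Python's recursive gcd; `a % 0` raises ZeroDivisionError in Python, a case Pre_ excludes (we return 0 there).
def pygcd (a b : Int) : Int :=
  if hb : b = 0 then 0
  else if PySem.Int.mod a b = 0 then b
  else pygcd b (PySem.Int.mod a b)
termination_by b.natAbs
decreasing_by
  rcases lt_or_gt_of_ne hb with h | h
  · have h1 := (PySem.Int.mod_neg_bounds (a := a) h).1
    have h2 := (PySem.Int.mod_neg_bounds (a := a) h).2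
    omega
  · have h1 := PySem.Int.mod_nonneg (a := a) h
    have h2 := PySem.Int.mod_lt (a := a) h
    omega

-- the `while n != 1: d = gcd(n, g); if d == 1: break; n //= d` loop; fuel bounds the
-- iteration count (inside Pre_ the loop always finishes before the fuel runs out);
-- `some true` = fell out of the loop with n == 1, `some false` = break.
def stripLoop (fuel : Nat) (n g : Int) : Option Bool :=
  match fuel with
  | 0 => none
  | f + 1 =>
    if n = 1 then some true
    else
      let d := pygcd n g
      if d = 1 then some false
      else stripLoop f (PySem.Int.floordiv n d) g

def hasSameFactor (a : Int) (b : Int) : Bool :=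
  let g := pygcd a b
  match stripLoop (a.natAbs + 1) a g with
  | some true =>
    match stripLoop (b.natAbs + 1) b g with
    | some true => true
    | _ => false
  | _ => false

-- ===== PORT B =====
def hasSameFactor_alt (a : Int) (b : Int) : Bool :=
  PySem.Int.mod (b ^ 32) a == 0 && PySem.Int.mod (a ^ 32) b == 0

-- ===== PRECONDITION & SPEC =====
-- Pre_ restricts to the task's natural domain of positive integers. Outside it A raises
-- ZeroDivisionError when b = 0 and on the other non-positive inputs it either diverges or
-- returns sign-dependent accidental values (e.g. False on (-6,6) but True on (6,-6)); since
-- A diverges on part of every such sign pattern, the whole non-positive region is excluded,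
-- even though on some of it A happens to return the same value as B.
def Pre_hasSameFactor (a : Int) (b : Int) : Prop := 1 ≤ a ∧ 1 ≤ b
instance (a : Int) (b : Int) : Decidable (Pre_hasSameFactor a b) := by unfold Pre_hasSameFactor; infer_instance

def pvWitness_hasSameFactor : Int × Int := (6, 12)

def Spec_hasSameFactor (a : Int) (b : Int) (out : Bool) : Prop := out = hasSameFactor_alt a b
instance (a : Int) (b : Int) (out : Bool) : Decidable (Spec_hasSameFactor a b out) := by unfold Spec_hasSameFactor; infer_instance

-- ===== CLAIM (what is proved, stated in full; the proofs are below) =====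
def Claim_equal_hasSameFactor : Prop := ∀ (a : Int) (b : Int), Dom_hasSameFactor a b → Pre_hasSameFactor a b → Spec_hasSameFactor a b (hasSameFactor a b)

-- ===== LEMMAS AND PROOFS =====

-- Python's gcd is Int.gcd whenever the second argument is positive.
theorem pygcd_eq_gcd (b a : Int) (hb : 0 < b) : pygcd a b = (Int.gcd a b : Int) := by
  rw [pygcd, dif_neg hb.ne']
  by_cases h : PySem.Int.mod a b = 0
  · rw [if_pos h]
    have hd : b ∣ a := (PySem.Int.mod_eq_zero_iff_dvd a b).mp h
    rw [Int.gcd_eq_natAbs_right_iff_dvd.mpr hd]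
    omega
  · rw [if_neg h]
    have hpos : 0 < PySem.Int.mod a b :=
      lt_of_le_of_ne (PySem.Int.mod_nonneg (a := a) hb) (Ne.symm h)
    rw [pygcd_eq_gcd (PySem.Int.mod a b) b hpos,
        PySem.Int.mod_eq_emod_of_pos (a := a) hb, Int.gcd_comm, Int.gcd_emod]
termination_by b.natAbs
decreasing_by
  have h1 := PySem.Int.mod_nonneg (a := a) hb
  have h2 := PySem.Int.mod_lt (a := a) hb
  omega

-- the strip loop decides "every prime divisor of n divides g"
theorem stripLoop_eq (fuel : Nat) (n g : Int) (hn : 0 < n) (hg : 0 < g)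
    (hf : n.natAbs < fuel) :
    stripLoop fuel n g = some (decide (n.natAbs.primeFactors ⊆ g.natAbs.primeFactors)) := by
  induction fuel generalizing n with
  | zero => omega
  | succ f ih =>
    rw [stripLoop]
    by_cases h1 : n = 1
    · subst h1
      simp [Nat.primeFactors_one, Finset.empty_subset]
    · rw [if_neg h1, pygcd_eq_gcd g n hg]
      have hgcd : Int.gcd n g = Nat.gcd n.natAbs g.natAbs := Int.gcd_eq_natAbs_gcd_natAbs n g
      by_cases h2 : (Int.gcd n g : Int) = 1
      · rw [if_pos h2]
        have hnot : ¬ n.natAbs.primeFactors ⊆ g.natAbs.primeFactors := by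
          intro hsub
          obtain ⟨p, hp, hpd⟩ := Nat.exists_prime_and_dvd (n := n.natAbs) (by omega)
          have hpm : p ∈ n.natAbs.primeFactors :=
            Nat.mem_primeFactors.mpr ⟨hp, hpd, by omega⟩
          have hpg : p ∣ g.natAbs := Nat.dvd_of_mem_primeFactors (hsub hpm)
          have : p ∣ Nat.gcd n.natAbs g.natAbs := Nat.dvd_gcd hpd hpg
          rw [← hgcd] at this
          have h2' : Int.gcd n g = 1 := by exact_mod_cast h2
          rw [h2'] at this
          exact hp.one_lt.ne' (Nat.eq_one_of_dvd_one this)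
        simp [hnot]
      · rw [if_neg h2]
        have hdpos : 0 < (Int.gcd n g : Int) := by
          have := Int.gcd_pos_of_ne_zero_left g (a := n) (by omega)
          exact_mod_cast this
        have hd2 : (2 : Int) ≤ (Int.gcd n g : Int) := by omega
        have hdvd : (Int.gcd n g : Int) ∣ n := Int.gcd_dvd_left n g
        rw [PySem.Int.floordiv_eq_ediv_of_pos hdpos]
        set d : Int := (Int.gcd n g : Int) with hdd
        set n' : Int := n / d with hn'
        have hmul : n' * d = n := Int.ediv_mul_cancel hdvd
        have hn'pos : 0 < n' := by
          rcases lt_trichotomy n' 0 with h | h | h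
          · nlinarith [hmul]
          · rw [h, Int.zero_mul] at hmul
            omega
          · exact h
        have hlt : n'.natAbs < n.natAbs := by
          have h2n : n' < n := by nlinarith [hmul, hd2, hn'pos]
          omega
        rw [ih n' hn'pos (by omega)]
        congr 1
        rw [decide_eq_decide]
        have hfact : n.natAbs = n'.natAbs * d.natAbs := by
          rw [← Int.natAbs_mul, hmul]
        constructor
        · intro hsub p hp
          have hprime := Nat.prime_of_mem_primeFactors hp
          have hpd : p ∣ n.natAbs := Nat.dvd_of_mem_primeFactors hp
          rw [hfact] at hpd
          rcases hprime.dvd_mul.mp hpd with hcase | hcase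
          · exact hsub (Nat.mem_primeFactors.mpr ⟨hprime, hcase, by omega⟩)
          · have hpg : p ∣ g.natAbs := by
              have : d.natAbs = Nat.gcd n.natAbs g.natAbs := by
                rw [hdd, Int.natAbs_natCast, hgcd]
              rw [this] at hcase
              exact hcase.trans (Nat.gcd_dvd_right _ _)
            exact Nat.mem_primeFactors.mpr ⟨hprime, hpg, by omega⟩
        · intro hsub p hp
          have hprime := Nat.prime_of_mem_primeFactors hp
          have hpd : p ∣ n'.natAbs := Nat.dvd_of_mem_primeFactors hp
          have : p ∣ n.natAbs := hpd.trans ⟨d.natAbs, hfact⟩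
          exact hsub (Nat.mem_primeFactors.mpr ⟨hprime, this, by omega⟩)

-- on the 32-bit domain, "every prime of m divides k" is "m divides k^32"
theorem radSub_iff_dvd_pow (m k : Nat) (hm : 0 < m) (hk : 0 < k) (hbound : m ≤ 2 ^ 31) :
    m.primeFactors ⊆ k.primeFactors ↔ m ∣ k ^ 32 := by
  constructor
  · intro hsub
    rw [← Nat.factorization_le_iff_dvd hm.ne' (pow_ne_zero 32 hk.ne'), Nat.factorization_pow]
    refine Finsupp.le_def.mpr fun p => ?_
    simp only [Finsupp.smul_apply, smul_eq_mul]
    by_cases hp : m.factorization p = 0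
    · simp [hp]
    · have hps : p ∈ m.primeFactors := by
        rw [← Nat.support_factorization]; exact Finsupp.mem_support_iff.mpr hp
      have hk1 : 1 ≤ k.factorization p := by
        have hpk := hsub hps
        rw [← Nat.support_factorization] at hpk
        have := Finsupp.mem_support_iff.mp hpk; omega
      have hprime : p.Prime := Nat.prime_of_mem_primeFactors hps
      have h31 : m.factorization p ≤ 31 := by
        have hle : p ^ m.factorization p ≤ m := Nat.le_of_dvd hm (Nat.ordProj_dvd m p)
        have h2 : 2 ^ m.factorization p ≤ 2 ^ 31 :=
          le_trans (le_trans (Nat.pow_le_pow_left hprime.two_le _) hle) hbound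
        exact (Nat.pow_le_pow_iff_right (by norm_num)).mp h2
      calc m.factorization p ≤ 31 := h31
        _ ≤ 32 * k.factorization p := by omega
  · intro hdvd p hp
    have hprime := Nat.prime_of_mem_primeFactors hp
    have h2 : p ∣ k ^ 32 := (Nat.dvd_of_mem_primeFactors hp).trans hdvd
    exact Nat.mem_primeFactors.mpr ⟨hprime, hprime.dvd_of_dvd_pow h2, hk.ne'⟩

-- B's boolean is the divisibility pair
theorem alt_eq_decide (a b : Int) :
    hasSameFactor_alt a b = (decide (a ∣ b ^ 32) && decide (b ∣ a ^ 32)) := by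
  rw [Bool.eq_iff_iff]
  simp [hasSameFactor_alt, PySem.Int.mod_eq_zero_iff_dvd]

-- ===== VERDICT (by name: the statement is the Claim_ definition above) =====
theorem hasSameFactor_spec : Claim_equal_hasSameFactor := by
  intro a b hdom hpre
  obtain ⟨ha, hb⟩ := hpre
  have hdom' : a ≤ 2 ^ 31 ∧ b ≤ 2 ^ 31 := by
    unfold Dom_hasSameFactor pvDomInt at hdom
    simp only [Bool.and_eq_true, decide_eq_true_eq] at hdom
    omega
  have hg : 0 < (Int.gcd a b : Int) := by
    have := Int.gcd_pos_of_ne_zero_left b (a := a) (by omega)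
    exact_mod_cast this
  have hiff1 : (a.natAbs.primeFactors ⊆ (Int.gcd a b : Int).natAbs.primeFactors ↔ a ∣ b ^ 32) := by
    rw [Int.natAbs_natCast, Int.gcd_eq_natAbs_gcd_natAbs,
        Nat.primeFactors_gcd (by omega) (by omega)]
    have : a.natAbs.primeFactors ⊆ a.natAbs.primeFactors ∩ b.natAbs.primeFactors ↔
        a.natAbs.primeFactors ⊆ b.natAbs.primeFactors := by
      constructor
      · intro h p hp; exact Finset.mem_of_mem_inter_right (h hp)
      · intro h; exact Finset.subset_inter (Finset.Subset.refl _) h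
    rw [this, radSub_iff_dvd_pow _ _ (by omega) (by omega) (by omega)]
    rw [← Int.natAbs_pow]
    exact Int.natAbs_dvd_natAbs
  have hiff2 : (b.natAbs.primeFactors ⊆ (Int.gcd a b : Int).natAbs.primeFactors ↔ b ∣ a ^ 32) := by
    rw [Int.natAbs_natCast, Int.gcd_eq_natAbs_gcd_natAbs,
        Nat.primeFactors_gcd (by omega) (by omega)]
    have : b.natAbs.primeFactors ⊆ a.natAbs.primeFactors ∩ b.natAbs.primeFactors ↔
        b.natAbs.primeFactors ⊆ a.natAbs.primeFactors := by
      constructor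
      · intro h p hp; exact Finset.mem_of_mem_inter_left (h hp)
      · intro h; exact Finset.subset_inter h (Finset.Subset.refl _)
    rw [this, radSub_iff_dvd_pow _ _ (by omega) (by omega) (by omega)]
    rw [← Int.natAbs_pow]
    exact Int.natAbs_dvd_natAbs
  unfold Spec_hasSameFactor
  simp only [Int.natAbs_natCast] at hiff1 hiff2
  show (let g := pygcd a b;
    match stripLoop (a.natAbs + 1) a g with
    | some true =>
      match stripLoop (b.natAbs + 1) b g with
      | some true => true
      | _ => false
    | _ => false) = _
  simp only [pygcd_eq_gcd b a hb,
    stripLoop_eq (a.natAbs + 1) a _ (by omega) hg (by omega),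
    stripLoop_eq (b.natAbs + 1) b _ (by omega) hg (by omega)]
  by_cases h1 : a ∣ b ^ 32 <;> by_cases h2 : b ∣ a ^ 32 <;>
    simp [h1, h2, hiff1, hiff2, alt_eq_decide]
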